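-- pv_equiv track=rewrite | github.com/FreeNingLu/MeloFormer | archived/hid_museformer_v0.1/_archived/analysis/archive_similarity/cross_instrument_similarity.py | get_instrument_name
-- ===== SOURCE A (Python) =====
-- def get_instrument_name(program: int) -> str:
--     """获取乐器名称"""
--     # GM 乐器分类
--     categories = {
--         (0, 7): 'Piano',
--         (8, 15): 'Chromatic Percussion',
--         (16, 23): 'Organ',
--         (24, 31): 'Guitar',
--         (32, 39): 'Bass',
--         (40, 47): 'Strings',
--         (48, 55): 'Ensemble',
--         (56, 63): 'Brass',
--         (64, 71): 'Reed',
--         (72, 79): 'Pipe',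
--         (80, 87): 'Synth Lead',
--         (88, 95): 'Synth Pad',
--         (96, 103): 'Synth Effects',
--         (104, 111): 'Ethnic',
--         (112, 119): 'Percussive',
--         (120, 127): 'Sound Effects',
--     }
--
--     for (start, end), name in categories.items():
--         if start <= program <= end:
--             return name
--     return f'Program_{program}'
-- ===== SOURCE B (Python) =====
-- _GM_CATEGORIES = [
--     'Piano', 'Chromatic Percussion', 'Organ', 'Guitar',
--     'Bass', 'Strings', 'Ensemble', 'Brass',
--     'Reed', 'Pipe', 'Synth Lead', 'Synth Pad',
--     'Synth Effects', 'Ethnic', 'Percussive', 'Sound Effects',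
-- ]
--
-- def get_instrument_name(program: int) -> str:
--     """获取乐器名称"""
--     if 0 <= program <= 127:
--         return _GM_CATEGORIES[program // 8]
--     return f'Program_{program}'
-- ===== Notes on version B (the rewrite author's own statement) =====
-- stated objective: simpler
-- what changed: Replaces the linear scan over the (start,end) range pairs with a single arithmetic index (floor division by the category width) into a flat list of category names, keeping the Program_{n} fallback for out-of-range programs.
import Mathlib
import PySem

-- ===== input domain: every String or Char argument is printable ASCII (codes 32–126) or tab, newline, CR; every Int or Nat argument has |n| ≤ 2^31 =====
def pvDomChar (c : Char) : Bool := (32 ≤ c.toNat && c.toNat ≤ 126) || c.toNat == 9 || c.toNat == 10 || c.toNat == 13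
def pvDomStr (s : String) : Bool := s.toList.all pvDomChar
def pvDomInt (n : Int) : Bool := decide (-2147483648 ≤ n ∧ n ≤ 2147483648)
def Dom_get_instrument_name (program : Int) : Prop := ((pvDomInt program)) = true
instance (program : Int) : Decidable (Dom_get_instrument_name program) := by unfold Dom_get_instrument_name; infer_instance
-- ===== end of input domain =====

-- B replaces A's linear scan over the (start,end) ranges by one arithmetic index (floor division)
-- into a flat list of names (objective: simpler).

-- ===== PORT A =====
-- the dict of A in insertion order: ((start, end), name) pairs
def pvCategories : List ((Int × Int) × String) :=
  [((0, 7), "Piano"), ((8, 15), "Chromatic Percussion"), ((16, 23), "Organ"),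
   ((24, 31), "Guitar"), ((32, 39), "Bass"), ((40, 47), "Strings"),
   ((48, 55), "Ensemble"), ((56, 63), "Brass"), ((64, 71), "Reed"),
   ((72, 79), "Pipe"), ((80, 87), "Synth Lead"), ((88, 95), "Synth Pad"),
   ((96, 103), "Synth Effects"), ((104, 111), "Ethnic"),
   ((112, 119), "Percussive"), ((120, 127), "Sound Effects")]

-- the for-loop with early return, as structural recursion over the items
def pvScan (program : Int) : List ((Int × Int) × String) → Option String
  | [] => none
  | ((s, e), name) :: rest =>
      if s ≤ program ∧ program ≤ e then some name else pvScan program rest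

def get_instrument_name (program : Int) : String :=
  match pvScan program pvCategories with
  | some name => name
  | none => "Program_" ++ PySem.Int.toStr program

-- ===== PORT B =====
def pvGmCategories : List String :=
  ["Piano", "Chromatic Percussion", "Organ", "Guitar",
   "Bass", "Strings", "Ensemble", "Brass",
   "Reed", "Pipe", "Synth Lead", "Synth Pad",
   "Synth Effects", "Ethnic", "Percussive", "Sound Effects"]

def get_instrument_name_alt (program : Int) : String :=
  if 0 ≤ program ∧ program ≤ 127 then
    -- names[program // 8] of Source B; the guard makes the index in range, so getD is never the default
    (PySem.List.pyGet? pvGmCategories (PySem.Int.floordiv program 8)).getD ""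
  else
    "Program_" ++ PySem.Int.toStr program

-- ===== PRECONDITION & SPEC =====
def Spec_get_instrument_name (program : Int) (out : String) : Prop := out = get_instrument_name_alt program
instance (program : Int) (out : String) : Decidable (Spec_get_instrument_name program out) := by unfold Spec_get_instrument_name; infer_instance

-- ===== CLAIM (what is proved, stated in full; the proofs are below) =====
def Claim_equal_get_instrument_name : Prop := ∀ (program : Int), Dom_get_instrument_name program → Spec_get_instrument_name program (get_instrument_name program)

-- ===== LEMMAS AND PROOFS =====

-- out of range on both sides: the scan finds nothing, the guard fails
theorem pvScan_none (program : Int) (l : List ((Int × Int) × String))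
    (h : ∀ x ∈ l, ¬ (x.1.1 ≤ program ∧ program ≤ x.1.2)) : pvScan program l = none := by
  induction l with
  | nil => rfl
  | cons a t ih =>
      obtain ⟨⟨s, e⟩, n⟩ := a
      simp only [pvScan, if_neg (h _ (List.mem_cons_self ..))]
      exact ih fun x hx => h x (List.mem_cons_of_mem _ hx)

theorem pv_out_of_range (program : Int) (h : ¬ (0 ≤ program ∧ program ≤ 127)) :
    get_instrument_name program = get_instrument_name_alt program := by
  have hscan : pvScan program pvCategories = none := by
    apply pvScan_none
    intro x hx
    fin_cases hx <;> dsimp <;> omega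
  simp [get_instrument_name, get_instrument_name_alt, hscan, h]

-- ===== VERDICT (by name: the statement is the Claim_ definition above) =====
theorem get_instrument_name_spec : Claim_equal_get_instrument_name := by
  intro program _
  unfold Spec_get_instrument_name
  by_cases h : 0 ≤ program ∧ program ≤ 127
  · obtain ⟨h0, h127⟩ := h
    interval_cases program <;> decide
  · exact pv_out_of_range program h
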